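-- pv_equiv track=rewrite | github.com/NeverAKWu/ustc_web2024 | lab2/stage_1/src/extract.py | map_to_indices
-- ===== SOURCE A (Python) =====
-- def map_to_indices(subgraph, douban_to_index, fb_to_douban, start_index):
--     entity_to_index = {}
--     relation_to_index = {}
--     current_entity_index = start_index
--     current_relation_index = 0
--
--     mapped_triples = []
--
--     for head, relation, tail in subgraph:
--         # 映射head
--         if head in fb_to_douban:
--             head_index = douban_to_index[fb_to_douban[head]]
--         else:
--             if head not in entity_to_index:
--                 entity_to_index[head] = current_entity_index
--                 current_entity_index += 1
--             head_index = entity_to_index[head]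
--
--         # 映射tail
--         if tail in fb_to_douban:
--             tail_index = douban_to_index[fb_to_douban[tail]]
--         else:
--             if tail not in entity_to_index:
--                 entity_to_index[tail] = current_entity_index
--                 current_entity_index += 1
--             tail_index = entity_to_index[tail]
--
--         # 映射relation
--         if relation not in relation_to_index:
--             relation_to_index[relation] = current_relation_index
--             current_relation_index += 1
--         relation_index = relation_to_index[relation]
--
--
--         mapped_triples.append((head_index, relation_index, tail_index))
--
--     return mapped_triples
-- ===== SOURCE B (Python) =====
-- def map_to_indices(subgraph, douban_to_index, fb_to_douban, start_index):
--     triples = list(subgraph)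
--     entity_to_index = {}
--     relation_to_index = {}
--     e = start_index
--     r = 0
--     # pass 1: assign indices (head, then tail, then relation, per triple)
--     for head, relation, tail in triples:
--         for x in (head, tail):
--             if x not in fb_to_douban and x not in entity_to_index:
--                 entity_to_index[x] = e
--                 e += 1
--         if relation not in relation_to_index:
--             relation_to_index[relation] = r
--             r += 1
--     # pass 2: pure lookups
--     def ent(x):
--         if x in fb_to_douban:
--             return douban_to_index[fb_to_douban[x]]
--         return entity_to_index[x]
--     return [(ent(h), relation_to_index[rel], ent(t)) for h, rel, t in triples]
-- ===== Notes on version B (the rewrite author's own statement) =====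
-- stated objective: alternative
-- what changed: Single mutate-and-emit loop split into two separate passes: a first pass that only builds the entity/relation index dicts (head-then-tail-then-relation order) and a second pass that emits the triples by pure dict lookups.
import Mathlib
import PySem

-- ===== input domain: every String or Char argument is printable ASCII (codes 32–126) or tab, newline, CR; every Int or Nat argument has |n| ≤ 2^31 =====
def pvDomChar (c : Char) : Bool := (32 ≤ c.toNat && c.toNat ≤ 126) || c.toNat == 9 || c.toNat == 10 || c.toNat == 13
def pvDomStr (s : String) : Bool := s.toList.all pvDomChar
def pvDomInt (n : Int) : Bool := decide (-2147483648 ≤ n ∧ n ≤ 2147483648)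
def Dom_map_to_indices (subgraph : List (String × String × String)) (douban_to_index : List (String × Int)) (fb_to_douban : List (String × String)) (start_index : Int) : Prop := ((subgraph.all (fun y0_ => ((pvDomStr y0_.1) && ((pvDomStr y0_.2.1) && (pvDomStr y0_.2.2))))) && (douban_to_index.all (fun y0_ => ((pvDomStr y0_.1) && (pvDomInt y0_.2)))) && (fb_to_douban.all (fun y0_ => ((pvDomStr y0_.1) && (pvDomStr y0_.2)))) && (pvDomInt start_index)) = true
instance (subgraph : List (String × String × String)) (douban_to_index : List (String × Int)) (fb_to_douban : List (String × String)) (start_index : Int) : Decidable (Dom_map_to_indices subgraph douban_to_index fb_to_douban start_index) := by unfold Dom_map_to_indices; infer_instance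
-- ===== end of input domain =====

-- B replaces A's single mutate-and-emit loop by a build-only pass over the triples followed by a
-- pure-lookup emitting pass (objective: alternative decomposition, same cost).

-- ===== PORT A =====
-- maps one entity: fb-mapped entities go through douban_to_index, others get/keep a fresh index.
-- Python raises KeyError when fb_to_douban[x] is missing from douban_to_index; that input is outside
-- Pre_map_to_indices, here the lookup-miss is rendered as .getD 0.
def mtiEnt (douban_to_index : List (String × Int)) (fb_to_douban : List (String × String)) (e : PySem.Dict String Int) (ce : Int) (x : String) : Int × PySem.Dict String Int × Int :=
  match fb_to_douban.lookup x with
  | some d => ((douban_to_index.lookup d).getD 0, e, ce)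
  | none =>
    let p := if e.contains x then (e, ce) else (e.insert x ce, ce + 1)
    ((p.1.get? x).getD 0, p.1, p.2)

-- loop state: (entity_to_index, relation_to_index, current_entity_index, current_relation_index, mapped_triples)
def mtiStep (douban_to_index : List (String × Int)) (fb_to_douban : List (String × String))
    (st : PySem.Dict String Int × PySem.Dict String Int × Int × Int × List (Int × Int × Int))
    (tr : String × String × String) :
    PySem.Dict String Int × PySem.Dict String Int × Int × Int × List (Int × Int × Int) :=
  let a := mtiEnt douban_to_index fb_to_douban st.1 st.2.2.1 tr.1
  let b := mtiEnt douban_to_index fb_to_douban a.2.1 a.2.2 tr.2.2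
  let q := if st.2.1.contains tr.2.1 then (st.2.1, st.2.2.2.1) else (st.2.1.insert tr.2.1 st.2.2.2.1, st.2.2.2.1 + 1)
  (b.2.1, q.1, b.2.2, q.2, st.2.2.2.2 ++ [(a.1, (q.1.get? tr.2.1).getD 0, b.1)])

def map_to_indices (subgraph : List (String × String × String)) (douban_to_index : List (String × Int)) (fb_to_douban : List (String × String)) (start_index : Int) : List (Int × Int × Int) :=
  (subgraph.foldl (mtiStep douban_to_index fb_to_douban) (PySem.Dict.empty, PySem.Dict.empty, start_index, 0, [])).2.2.2.2

-- ===== PORT B =====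
-- pass-1 helper: register one entity if it is neither fb-mapped nor already indexed
def bAddEnt (fb_to_douban : List (String × String)) (p : PySem.Dict String Int × Int) (x : String) : PySem.Dict String Int × Int :=
  if (fb_to_douban.lookup x).isNone && !(p.1.contains x) then (p.1.insert x p.2, p.2 + 1) else p

-- pass-1 step over one triple: head, then tail, then relation; state (e, r, ce, cr)
def bBuild (fb_to_douban : List (String × String))
    (st : PySem.Dict String Int × PySem.Dict String Int × Int × Int)
    (tr : String × String × String) :
    PySem.Dict String Int × PySem.Dict String Int × Int × Int :=
  let p := bAddEnt fb_to_douban (bAddEnt fb_to_douban (st.1, st.2.2.1) tr.1) tr.2.2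
  let q := if st.2.1.contains tr.2.1 then (st.2.1, st.2.2.2) else (st.2.1.insert tr.2.1 st.2.2.2, st.2.2.2 + 1)
  (p.1, q.1, p.2, q.2)

-- pass-2 entity lookup (pure)
def bLook (douban_to_index : List (String × Int)) (fb_to_douban : List (String × String)) (e : PySem.Dict String Int) (x : String) : Int :=
  match fb_to_douban.lookup x with
  | some d => (douban_to_index.lookup d).getD 0
  | none => (e.get? x).getD 0

def map_to_indices_alt (subgraph : List (String × String × String)) (douban_to_index : List (String × Int)) (fb_to_douban : List (String × String)) (start_index : Int) : List (Int × Int × Int) :=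
  let st := subgraph.foldl (bBuild fb_to_douban) (PySem.Dict.empty, PySem.Dict.empty, start_index, 0)
  subgraph.map (fun tr =>
    (bLook douban_to_index fb_to_douban st.1 tr.1,
     (st.2.1.get? tr.2.1).getD 0,
     bLook douban_to_index fb_to_douban st.1 tr.2.2))

-- ===== PRECONDITION & SPEC =====
-- Pre_ excludes exactly the inputs where Python A raises KeyError: some head/tail is a key of
-- fb_to_douban whose image is missing from douban_to_index.
def Pre_map_to_indices (subgraph : List (String × String × String)) (douban_to_index : List (String × Int)) (fb_to_douban : List (String × String)) (start_index : Int) : Prop :=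
  (subgraph.all (fun tr =>
    ((fb_to_douban.lookup tr.1).all fun d => (douban_to_index.lookup d).isSome) &&
    ((fb_to_douban.lookup tr.2.2).all fun d => (douban_to_index.lookup d).isSome))) = true
instance (subgraph : List (String × String × String)) (douban_to_index : List (String × Int)) (fb_to_douban : List (String × String)) (start_index : Int) : Decidable (Pre_map_to_indices subgraph douban_to_index fb_to_douban start_index) := by unfold Pre_map_to_indices; infer_instance

def pvWitness_map_to_indices : (List (String × String × String)) × (List (String × Int)) × (List (String × String)) × Int :=
  ([("a", "likes", "b"), ("b", "likes", "c")], [("x", 7)], [("a", "x")], 10)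

def Spec_map_to_indices (subgraph : List (String × String × String)) (douban_to_index : List (String × Int)) (fb_to_douban : List (String × String)) (start_index : Int) (out : List (Int × Int × Int)) : Prop := out = map_to_indices_alt subgraph douban_to_index fb_to_douban start_index
instance (subgraph : List (String × String × String)) (douban_to_index : List (String × Int)) (fb_to_douban : List (String × String)) (start_index : Int) (out : List (Int × Int × Int)) : Decidable (Spec_map_to_indices subgraph douban_to_index fb_to_douban start_index out) := by unfold Spec_map_to_indices; infer_instance

-- ===== CLAIM (what is proved, stated in full; the proofs are below) =====
def Claim_equal_map_to_indices : Prop := ∀ (subgraph : List (String × String × String)) (douban_to_index : List (String × Int)) (fb_to_douban : List (String × String)) (start_index : Int), Dom_map_to_indices subgraph douban_to_index fb_to_douban start_index → Pre_map_to_indices subgraph douban_to_index fb_to_douban start_index → Spec_map_to_indices subgraph douban_to_index fb_to_douban start_index (map_to_indices subgraph douban_to_index fb_to_douban start_index)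

-- ===== LEMMAS AND PROOFS =====

-- A's per-triple state update is B's pass-1 update
theorem mtiEnt_state (d2i : List (String × Int)) (fb : List (String × String)) (e : PySem.Dict String Int) (ce : Int) (x : String) :
    (mtiEnt d2i fb e ce x).2 = bAddEnt fb (e, ce) x := by
  unfold mtiEnt bAddEnt
  cases hfb : fb.lookup x
  · simp only [hfb]
    cases hc : e.contains x
    · simp [hc]
    · simp [hc]
  · simp [hfb]

theorem mtiEnt_state1 (d2i : List (String × Int)) (fb : List (String × String)) (e : PySem.Dict String Int) (ce : Int) (x : String) :
    (mtiEnt d2i fb e ce x).2.1 = (bAddEnt fb (e, ce) x).1 := by rw [mtiEnt_state]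

theorem mtiEnt_state2 (d2i : List (String × Int)) (fb : List (String × String)) (e : PySem.Dict String Int) (ce : Int) (x : String) :
    (mtiEnt d2i fb e ce x).2.2 = (bAddEnt fb (e, ce) x).2 := by rw [mtiEnt_state]

theorem mtiStep_state (d2i : List (String × Int)) (fb : List (String × String))
    (st : PySem.Dict String Int × PySem.Dict String Int × Int × Int × List (Int × Int × Int))
    (tr : String × String × String) :
    ((mtiStep d2i fb st tr).1, (mtiStep d2i fb st tr).2.1, (mtiStep d2i fb st tr).2.2.1, (mtiStep d2i fb st tr).2.2.2.1)
      = bBuild fb (st.1, st.2.1, st.2.2.1, st.2.2.2.1) tr := by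
  simp only [mtiStep, bBuild, mtiEnt_state1, mtiEnt_state2, Prod.mk.eta]

-- when x is not fb-mapped, A's computed index is bound to x in A's updated entity dict
theorem mtiEnt_self (d2i : List (String × Int)) (fb : List (String × String)) (e : PySem.Dict String Int) (ce : Int) (x : String)
    (hfb : fb.lookup x = none) :
    (mtiEnt d2i fb e ce x).2.1.get? x = some (mtiEnt d2i fb e ce x).1 := by
  unfold mtiEnt
  simp only [hfb]
  by_cases hc : e.contains x = true
  · have h := PySem.Dict.contains_eq_isSome_get? e x
    rw [hc] at h
    obtain ⟨v, hv⟩ := Option.isSome_iff_exists.mp h.symm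
    simp [hc, hv]
  · simp only [Bool.not_eq_true] at hc
    simp [hc, PySem.Dict.get?_insert_self]

-- pass-1 steps never disturb an existing entity binding
theorem bAddEnt_pres (fb : List (String × String)) (p : PySem.Dict String Int × Int) (x k : String) (v : Int)
    (h : p.1.get? k = some v) : (bAddEnt fb p x).1.get? k = some v := by
  unfold bAddEnt
  split
  · next hcond =>
    have hc : p.1.contains x = false := by
      rcases Bool.and_eq_true .. |>.mp hcond with ⟨_, h2⟩
      simpa using h2
    have hne : k ≠ x := by
      intro he; subst he
      rw [PySem.Dict.contains_eq_isSome_get?, h] at hc; simp at hc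
    rw [PySem.Dict.get?_insert_of_ne _ _ hne]; exact h
  · exact h

theorem bBuild_pres_e (fb : List (String × String)) (l : List (String × String × String))
    (st : PySem.Dict String Int × PySem.Dict String Int × Int × Int) (k : String) (v : Int)
    (h : st.1.get? k = some v) : (l.foldl (bBuild fb) st).1.get? k = some v := by
  induction l generalizing st with
  | nil => exact h
  | cons tr l ih =>
    apply ih
    show (bBuild fb st tr).1.get? k = some v
    unfold bBuild
    exact bAddEnt_pres _ _ _ _ _ (bAddEnt_pres _ _ _ _ _ h)

theorem bBuild_pres_r (fb : List (String × String)) (l : List (String × String × String))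
    (st : PySem.Dict String Int × PySem.Dict String Int × Int × Int) (k : String) (v : Int)
    (h : st.2.1.get? k = some v) : (l.foldl (bBuild fb) st).2.1.get? k = some v := by
  induction l generalizing st with
  | nil => exact h
  | cons tr l ih =>
    apply ih
    show (bBuild fb st tr).2.1.get? k = some v
    unfold bBuild
    by_cases hc : st.2.1.contains tr.2.1 = true
    · simpa [hc]
    · have hne : k ≠ tr.2.1 := by
        intro he; subst he
        rw [PySem.Dict.contains_eq_isSome_get?, h] at hc; simp at hc
      simp only [Bool.not_eq_true] at hc
      simp only [hc, Bool.false_eq_true, if_false]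
      rw [PySem.Dict.get?_insert_of_ne _ _ hne]; exact h

-- the relation step binds the current relation
theorem rel_step_self (r : PySem.Dict String Int) (cr : Int) (rel : String) :
    ((if r.contains rel then (r, cr) else (r.insert rel cr, cr + 1)).1.get? rel).isSome = true := by
  by_cases hc : r.contains rel = true
  · simp only [hc, if_true]
    rw [← PySem.Dict.contains_eq_isSome_get?]; exact hc
  · simp only [hc, if_false]
    simp [PySem.Dict.get?_insert_self]

-- main invariant: A's fold from any state = acc ++ pure lookups in B's final pass-1 state
theorem mti_main (d2i : List (String × Int)) (fb : List (String × String))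
    (l : List (String × String × String))
    (e r : PySem.Dict String Int) (ce cr : Int) (acc : List (Int × Int × Int)) :
    (l.foldl (mtiStep d2i fb) (e, r, ce, cr, acc)).2.2.2.2 =
      acc ++ l.map (fun tr =>
        (bLook d2i fb (l.foldl (bBuild fb) (e, r, ce, cr)).1 tr.1,
         ((l.foldl (bBuild fb) (e, r, ce, cr)).2.1.get? tr.2.1).getD 0,
         bLook d2i fb (l.foldl (bBuild fb) (e, r, ce, cr)).1 tr.2.2)) := by
  induction l generalizing e r ce cr acc with
  | nil => simp
  | cons tr l ih =>
    have hstep := mtiStep_state d2i fb (e, r, ce, cr, acc) tr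
    set s1 := mtiStep d2i fb (e, r, ce, cr, acc) tr with hs1
    have hfold : (List.foldl (mtiStep d2i fb) (e, r, ce, cr, acc) (tr :: l)).2.2.2.2
        = (List.foldl (mtiStep d2i fb) (s1.1, s1.2.1, s1.2.2.1, s1.2.2.2.1, s1.2.2.2.2) l).2.2.2.2 := by
      rw [List.foldl_cons, ← hs1]
    rw [hfold, ih]
    have hb : List.foldl (bBuild fb) (e, r, ce, cr) (tr :: l)
        = List.foldl (bBuild fb) (s1.1, s1.2.1, s1.2.2.1, s1.2.2.2.1) l := by
      simp [List.foldl_cons, ← hstep]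
    rw [hb]
    -- now reduce to: s1's acc = acc ++ [lookup of tr in the final state]
    set F := List.foldl (bBuild fb) (s1.1, s1.2.1, s1.2.2.1, s1.2.2.2.1) l with hF
    have hacc : s1.2.2.2.2 = acc ++
        [((mtiEnt d2i fb e ce tr.1).1,
          (((if r.contains tr.2.1 then (r, cr) else (r.insert tr.2.1 cr, cr + 1)).1.get? tr.2.1).getD 0),
          (mtiEnt d2i fb (mtiEnt d2i fb e ce tr.1).2.1 (mtiEnt d2i fb e ce tr.1).2.2 tr.2.2).1)] := by
      simp [hs1, mtiStep]
    rw [hacc, List.append_assoc]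
    simp only [List.map_cons]
    congr 1
    simp only [List.singleton_append, List.cons.injEq]
    refine ⟨?_, trivial⟩
    -- the triple emitted by A equals the final-state lookups
    have hs1e : s1.1 = (mtiEnt d2i fb (mtiEnt d2i fb e ce tr.1).2.1 (mtiEnt d2i fb e ce tr.1).2.2 tr.2.2).2.1 := by
      simp [hs1, mtiStep]
    have hs1r : s1.2.1 = (if r.contains tr.2.1 then (r, cr) else (r.insert tr.2.1 cr, cr + 1)).1 := by
      simp [hs1, mtiStep]
    have hFst : F = List.foldl (bBuild fb) (s1.1, s1.2.1, s1.2.2.1, s1.2.2.2.1) l := hF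
    refine Prod.ext ?_ (Prod.ext ?_ ?_)
    · -- head
      show (mtiEnt d2i fb e ce tr.1).1 = bLook d2i fb F.1 tr.1
      cases hfb : fb.lookup tr.1 with
      | some d => simp [mtiEnt, bLook, hfb]
      | none =>
        have h1 : (mtiEnt d2i fb e ce tr.1).2.1.get? tr.1 = some (mtiEnt d2i fb e ce tr.1).1 :=
          mtiEnt_self d2i fb e ce tr.1 hfb
        have h2 : s1.1.get? tr.1 = some (mtiEnt d2i fb e ce tr.1).1 := by
          rw [hs1e, mtiEnt_state]
          exact bAddEnt_pres _ _ _ _ _ h1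
        have h3 : F.1.get? tr.1 = some (mtiEnt d2i fb e ce tr.1).1 := by
          rw [hFst]
          exact bBuild_pres_e fb l _ _ _ h2
        simp [bLook, hfb, h3]
    · -- relation
      show ((if r.contains tr.2.1 then (r, cr) else (r.insert tr.2.1 cr, cr + 1)).1.get? tr.2.1).getD 0
          = (F.2.1.get? tr.2.1).getD 0
      have h0 := rel_step_self r cr tr.2.1
      obtain ⟨v, hv⟩ := Option.isSome_iff_exists.mp h0
      have h2 : s1.2.1.get? tr.2.1 = some v := by rw [hs1r]; exact hv
      have h3 : F.2.1.get? tr.2.1 = some v := by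
        rw [hFst]; exact bBuild_pres_r fb l _ _ _ h2
      rw [hv, h3]
    · -- tail
      show (mtiEnt d2i fb (mtiEnt d2i fb e ce tr.1).2.1 (mtiEnt d2i fb e ce tr.1).2.2 tr.2.2).1
          = bLook d2i fb F.1 tr.2.2
      cases hfb : fb.lookup tr.2.2 with
      | some d => simp [mtiEnt, bLook, hfb]
      | none =>
        have h1 := mtiEnt_self d2i fb (mtiEnt d2i fb e ce tr.1).2.1 (mtiEnt d2i fb e ce tr.1).2.2 tr.2.2 hfb
        have h2 : s1.1.get? tr.2.2
            = some (mtiEnt d2i fb (mtiEnt d2i fb e ce tr.1).2.1 (mtiEnt d2i fb e ce tr.1).2.2 tr.2.2).1 := by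
          rw [hs1e]; exact h1
        have h3 : F.1.get? tr.2.2
            = some (mtiEnt d2i fb (mtiEnt d2i fb e ce tr.1).2.1 (mtiEnt d2i fb e ce tr.1).2.2 tr.2.2).1 := by
          rw [hFst]; exact bBuild_pres_e fb l _ _ _ h2
        simp [bLook, hfb, h3]

-- ===== VERDICT (by name: the statement is the Claim_ definition above) =====
theorem map_to_indices_spec : Claim_equal_map_to_indices := by
  intro subgraph d2i fb start _ _
  unfold Spec_map_to_indices map_to_indices map_to_indices_alt
  simpa using mti_main d2i fb subgraph PySem.Dict.empty PySem.Dict.empty start 0 []
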